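-- pv_equiv track=rewrite | github.com/tphu14/webscan | detection/payload_mutator.py | _hex_encode_partial
-- ===== SOURCE A (Python) =====
-- def _hex_encode_partial(p: str) -> str:
--     """Encode only special chars that trigger WAF"""
--     result = ""
--     special = set("<>\"'();= ")
--     for c in p:
--         if c in special:
--             result += f"%{ord(c):02x}"
--         else:
--             result += c
--     return result
-- ===== SOURCE B (Python) =====
-- def _hex_encode_partial(p: str) -> str:
--     """Encode only special chars that trigger WAF"""
--     # staged passes: one global replace per special character; sound because
--     # the replacement text "%xx" contains no special characters itself
--     for c in "<>\"'();= ":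
--         p = p.replace(c, f"%{ord(c):02x}")
--     return p
-- ===== Notes on version B (the rewrite author's own statement) =====
-- stated objective: alternative
-- what changed: Replaces A's single char-by-char pass with if/else and string accumulation by nine staged whole-string replace passes, one per special character; correct because the hex replacement texts contain no special characters.
import Mathlib
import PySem

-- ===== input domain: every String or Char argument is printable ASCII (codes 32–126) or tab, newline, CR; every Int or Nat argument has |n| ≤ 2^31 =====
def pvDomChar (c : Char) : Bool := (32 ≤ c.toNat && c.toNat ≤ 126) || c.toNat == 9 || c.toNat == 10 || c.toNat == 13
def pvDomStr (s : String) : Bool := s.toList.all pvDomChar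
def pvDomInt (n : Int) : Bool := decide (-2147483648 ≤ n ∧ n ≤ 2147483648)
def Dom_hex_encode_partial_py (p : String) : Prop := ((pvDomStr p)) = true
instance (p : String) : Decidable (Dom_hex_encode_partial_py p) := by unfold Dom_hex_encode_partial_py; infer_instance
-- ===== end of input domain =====

-- B replaces A's single char-by-char pass (if/else + accumulation) by nine staged
-- whole-string replace passes, one per special character (alternative decomposition).

-- ===== PORT A =====
-- f"%{n:02x}": lowercase hex, padded to width 2 — exact for n < 256 (all chars in
-- the special set have codes < 128, so this helper is exact everywhere it is used)
def pvHexDigit (n : Nat) : Char := if n < 10 then Char.ofNat (48 + n) else Char.ofNat (87 + n)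
def pvHex02 (n : Nat) : List Char := ['%', pvHexDigit (n / 16), pvHexDigit (n % 16)]

def pvSpecial : PySem.Set Char := PySem.Set.ofList "<>\"'();= ".toList

def hex_encode_partial_py (p : String) : String :=
  String.ofList (p.toList.foldl
    (fun result c => if c ∈ pvSpecial then result ++ pvHex02 c.toNat else result ++ [c]) [])

-- ===== PORT B =====
def hex_encode_partial_py_alt (p : String) : String :=
  "<>\"'();= ".toList.foldl
    (fun s c => PySem.Str.replace s (String.ofList [c]) (String.ofList (pvHex02 c.toNat))) p

-- ===== PRECONDITION & SPEC =====
def Spec_hex_encode_partial_py (p : String) (out : String) : Prop := out = hex_encode_partial_py_alt p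
instance (p : String) (out : String) : Decidable (Spec_hex_encode_partial_py p out) := by unfold Spec_hex_encode_partial_py; infer_instance

-- ===== CLAIM (what is proved, stated in full; the proofs are below) =====
def Claim_equal_hex_encode_partial_py : Prop := ∀ (p : String), Dom_hex_encode_partial_py p → Spec_hex_encode_partial_py p (hex_encode_partial_py p)

-- ===== LEMMAS AND PROOFS =====

-- single-char substitution, the per-character meaning of one replace pass
def pvSubst (x : Char) (new : List Char) (c : Char) : List Char :=
  if c = x then new else [c]

-- replace with a single-character pattern is the char-wise substitution pvSubst
theorem pv_replace_go_single (x : Char) (new : List Char) :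
    ∀ (fuel : Nat) (l acc : List Char), l.length ≤ fuel →
      PySem.Chars.replace.go [x] new fuel l acc =
        acc.reverse ++ l.flatMap (pvSubst x new) := by
  intro fuel
  induction fuel with
  | zero =>
    intro l acc h
    have : l = [] := List.length_eq_zero_iff.mp (Nat.le_zero.mp h)
    subst this
    simp [PySem.Chars.replace.go]
  | succ n ih =>
    intro l acc h
    cases l with
    | nil => simp [PySem.Chars.replace.go]
    | cons c t =>
      have ht : t.length ≤ n := by simpa using h
      by_cases hc : c = x
      · subst hc
        have hp : List.isPrefixOf [c] (c :: t) = true := by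
          simp [List.isPrefixOf]
        rw [PySem.Chars.replace.go, if_pos hp]
        simp only [List.length_cons, List.length_nil, List.drop_succ_cons, List.drop_zero]
        rw [ih t (new.reverse ++ acc) ht]
        simp [pvSubst]
      · have hp : List.isPrefixOf [x] (c :: t) = false := by
          simp [List.isPrefixOf]
          exact fun e => hc e.symm
        rw [PySem.Chars.replace.go, if_neg (by simp [hp])]
        rw [ih t (c :: acc) ht]
        simp [pvSubst, hc]

theorem pv_replace_single (x : Char) (new l : List Char) :
    PySem.Chars.replace l [x] new = l.flatMap (pvSubst x new) := by
  rw [PySem.Chars.replace, if_neg (by simp)]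
  simpa using pv_replace_go_single x new l.length l [] le_rfl

-- a fold of char-wise substitutions distributes over the characters of the input
theorem pv_fold_flatMap (g : Char → List Char) (cs : List Char) :
    ∀ (l : List Char),
      cs.foldl (fun s x => s.flatMap (pvSubst x (g x))) l =
        l.flatMap (fun c => cs.foldl (fun s x => s.flatMap (pvSubst x (g x))) [c]) := by
  induction cs with
  | nil => intro l; simp
  | cons x cs ih =>
    intro l
    simp only [List.foldl_cons]
    rw [ih (l.flatMap (pvSubst x (g x))), List.flatMap_assoc]
    congr 1
    funext c
    rw [show List.flatMap (pvSubst x (g x)) [c] = pvSubst x (g x) c by simp]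
    exact (ih (pvSubst x (g x) c)).symm

-- the nine staged passes act on a single character exactly as A's branch does
theorem pv_pointwise (c : Char) :
    "<>\"'();= ".toList.foldl
        (fun s x => s.flatMap (pvSubst x (pvHex02 x.toNat))) [c] =
      (if c ∈ pvSpecial then pvHex02 c.toNat else [c]) := by
  by_cases h : c ∈ pvSpecial
  · have h' : c = '<' ∨ c = '>' ∨ c = '"' ∨ c = '\'' ∨ c = '(' ∨ c = ')' ∨
        c = ';' ∨ c = '=' ∨ c = ' ' := by
      have hs : pvSpecial = ['<', '>', '"', '\'', '(', ')', ';', '=', ' '] := by decide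
      rw [hs] at h
      simpa using h
    rcases h' with h' | h' | h' | h' | h' | h' | h' | h' | h' <;> subst h' <;> decide
  · rw [if_neg h]
    have hnot : ∀ x ∈ "<>\"'();= ".toList, c ≠ x := by
      intro x hx he
      subst he
      exact h (by
        have : pvSpecial = ['<', '>', '"', '\'', '(', ')', ';', '=', ' '] := by decide
        rw [this]
        simpa using hx)
    have key : ∀ (cs : List Char), (∀ x ∈ cs, c ≠ x) →
        cs.foldl (fun s x => s.flatMap (pvSubst x (pvHex02 x.toNat))) [c] = [c] := by
      intro cs
      induction cs with
      | nil => intro _; simp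
      | cons x cs ih =>
        intro hcs
        simp only [List.foldl_cons]
        have : pvSubst x (pvHex02 x.toNat) c = [c] := by
          simp [pvSubst, hcs x (by simp)]
        simp only [List.flatMap_cons, List.flatMap_nil, this, List.append_nil]
        exact ih (fun y hy => hcs y (by simp [hy]))
    exact key _ hnot

-- B's string-level fold, viewed on the character list
theorem pv_alt_toList (p : String) :
    (hex_encode_partial_py_alt p).toList =
      "<>\"'();= ".toList.foldl
        (fun s x => s.flatMap (pvSubst x (pvHex02 x.toNat))) p.toList := by
  unfold hex_encode_partial_py_alt
  generalize "<>\"'();= ".toList = cs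
  induction cs generalizing p with
  | nil => simp
  | cons x cs ih =>
    simp only [List.foldl_cons]
    rw [ih]
    congr 1
    simp [PySem.Str.toList_replace, pv_replace_single]

-- A's accumulate-per-character loop written as a flatMap over the input
theorem pv_A_toList (p : String) :
    (hex_encode_partial_py p).toList =
      p.toList.flatMap (fun c => if c ∈ pvSpecial then pvHex02 c.toNat else [c]) := by
  unfold hex_encode_partial_py
  have hfun : (fun (result : List Char) (c : Char) =>
      if c ∈ pvSpecial then result ++ pvHex02 c.toNat else result ++ [c]) =
      fun result c => result ++ (if c ∈ pvSpecial then pvHex02 c.toNat else [c]) := by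
    funext result c; split <;> rfl
  rw [hfun, PySem.List.foldl_append_eq_flatMap]
  simp

-- B's staged passes also written as a flatMap over the input
theorem pv_B_toList (p : String) :
    (hex_encode_partial_py_alt p).toList =
      p.toList.flatMap (fun c => "<>\"'();= ".toList.foldl
        (fun s x => s.flatMap (pvSubst x (pvHex02 x.toNat))) [c]) := by
  have h := pv_alt_toList p
  rw [pv_fold_flatMap (fun x => pvHex02 x.toNat)] at h
  simpa using h

theorem pv_key (p : String) :
    (hex_encode_partial_py p).toList = (hex_encode_partial_py_alt p).toList := by
  rw [pv_A_toList, pv_B_toList]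
  refine List.flatMap_congr ?_
  intro c _
  exact (pv_pointwise c).symm

theorem pv_str_ext (s t : String) (h : s.toList = t.toList) : s = t :=
  String.toList_inj.mp h

-- ===== VERDICT (by name: the statement is the Claim_ definition above) =====
theorem hex_encode_partial_py_spec : Claim_equal_hex_encode_partial_py := by
  intro p _
  unfold Spec_hex_encode_partial_py
  exact pv_str_ext _ _ (pv_key p)
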